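-- pv_equiv track=rewrite | github.com/jjhh0210/PythonStudy | practice_src/baekjoon/3986_좋은단어.py | solution
-- ===== SOURCE A (Python) =====
-- def solution(n,words):
--     ans = 0 # 좋은단어 수
--     stack = []
--
--     for word in words:
--         stack.clear()
--         # 홀수 단어 거르기
--         if len(word)%2 == 1:
--             continue
--         for ch in word:
--             # pop 할 조건
--             if stack and stack[-1]==ch:
--                 stack.pop()
--             else: # stack이 0이거나 top이랑 다르면 push
--                 stack.append(ch)
--         # 좋은 단어 : 스택이 비었음
--         if not stack:
--             ans+=1
--
--     return ans
-- ===== SOURCE B (Python) =====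
-- def solution(n, words):
--     ans = 0
--     for word in words:
--         chars = list(word)
--         while True:
--             for i in range(len(chars) - 1):
--                 if chars[i] == chars[i + 1]:
--                     del chars[i:i + 2]
--                     break
--             else:
--                 break
--         if not chars:
--             ans += 1
--     return ans
-- ===== Notes on version B (the rewrite author's own statement) =====
-- stated objective: alternative
-- what changed: Replaces A's single-pass stack reduction (with an odd-length pre-filter) by repeated scan-and-delete of the first adjacent equal pair until a fixpoint, counting words that reduce to empty; the odd-length check is dropped as redundant.
import Mathlib
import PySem

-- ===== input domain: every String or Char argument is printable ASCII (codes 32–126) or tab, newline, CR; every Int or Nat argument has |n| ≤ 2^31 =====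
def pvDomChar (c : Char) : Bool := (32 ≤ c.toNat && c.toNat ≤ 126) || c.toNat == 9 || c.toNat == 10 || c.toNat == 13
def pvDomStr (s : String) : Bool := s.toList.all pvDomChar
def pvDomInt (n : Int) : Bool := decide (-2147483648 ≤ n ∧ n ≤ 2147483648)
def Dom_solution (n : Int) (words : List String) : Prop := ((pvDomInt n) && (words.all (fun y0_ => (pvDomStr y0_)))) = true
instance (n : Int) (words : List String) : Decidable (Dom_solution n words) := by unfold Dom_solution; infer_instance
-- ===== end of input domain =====

-- B replaces A's single-pass stack reduction by repeated delete-first-adjacent-pair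
-- until a fixpoint (dropping A's redundant odd-length filter); alternative decomposition,
-- no speed claim. Both are total; equivalence is proved on all of Dom.

-- ===== PORT A =====
-- stack is ported head-as-top (Python append/pop at the end ↔ cons/tail at the head).
def pvStep (stack : List Char) (ch : Char) : List Char :=
  match stack with
  | top :: rest => if top = ch then rest else ch :: stack   -- `if stack and stack[-1]==ch: pop else push`
  | [] => ch :: stack

def solution (n : Int) (words : List String) : Int :=
  words.foldl (fun ans word =>
    if PySem.Int.mod (PySem.Str.len word) 2 = 1 then ans   -- odd-length filter (`continue`)
    else
      let stack := word.toList.foldl pvStep []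
      if stack = [] then ans + 1 else ans) 0

-- ===== PORT B =====
-- one inner `for` scan of Source B: find the first adjacent equal pair, delete it
def pvDelFirst? : List Char → Option (List Char)
  | a :: b :: t => if a = b then some t else (pvDelFirst? (b :: t)).map (a :: ·)
  | _ => none

theorem pvDelFirst?_length : ∀ {w w' : List Char}, pvDelFirst? w = some w' → w'.length + 2 = w.length := by
  intro w
  induction w with
  | nil => intro w' h; simp [pvDelFirst?] at h
  | cons a t ih =>
    intro w' h
    match t, h with
    | b :: t, h =>
      by_cases hab : a = b
      · simp [pvDelFirst?, hab] at h; simp [← h]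
      · simp [pvDelFirst?, hab] at h
        obtain ⟨u, hu, rfl⟩ := h
        have := ih hu
        simpa using this

-- Source B's outer `while True` loop: delete pairs until no deletion happens
def pvReduceFix (w : List Char) : List Char :=
  match h : pvDelFirst? w with
  | some w' => pvReduceFix w'
  | none => w
termination_by w.length
decreasing_by have := pvDelFirst?_length h; omega

def solution_alt (n : Int) (words : List String) : Int :=
  words.foldl (fun ans word =>
    if pvReduceFix word.toList = [] then ans + 1 else ans) 0

-- ===== PRECONDITION & SPEC =====
def Spec_solution (n : Int) (words : List String) (out : Int) : Prop := out = solution_alt n words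
instance (n : Int) (words : List String) (out : Int) : Decidable (Spec_solution n words out) := by unfold Spec_solution; infer_instance

-- ===== CLAIM (what is proved, stated in full; the proofs are below) =====
def Claim_equal_solution : Prop := ∀ (n : Int) (words : List String), Dom_solution n words → Spec_solution n words (solution n words)

-- ===== LEMMAS AND PROOFS =====

-- a stack produced by pvStep never holds two equal adjacent characters
def pvReduced (s : List Char) : Prop := List.IsChain (· ≠ ·) s

theorem pvStep_reduced {s : List Char} (hs : pvReduced s) (ch : Char) : pvReduced (pvStep s ch) := by
  match s with
  | [] => simp [pvStep, pvReduced]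
  | top :: rest =>
    by_cases h : top = ch
    · simpa [pvStep, h, pvReduced] using hs.tail
    · simp only [pvStep, if_neg h]
      exact hs.cons (by intro y hy; simp at hy; subst hy; exact fun e => h e.symm)

theorem pvStep_step_self {s : List Char} (hs : pvReduced s) (a : Char) :
    pvStep (pvStep s a) a = s := by
  match s with
  | [] => simp [pvStep]
  | top :: rest =>
    by_cases h : top = a
    · subst h
      match rest, hs with
      | [], _ => simp [pvStep]
      | b :: r, hs =>
        have hba : top ≠ b := (List.isChain_cons_cons.mp hs).1
        have hba' : b ≠ top := Ne.symm hba
        simp [pvStep, hba']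
    · simp [pvStep, h]

-- deleting an adjacent equal pair does not change the stack result (from a reduced stack)
theorem pvFoldl_del {w : List Char} : ∀ {w' s : List Char}, pvReduced s →
    pvDelFirst? w = some w' → w'.foldl pvStep s = w.foldl pvStep s := by
  induction w with
  | nil => intro w' s _ h; simp [pvDelFirst?] at h
  | cons a t ih =>
    intro w' s hs h
    match t, h with
    | b :: t, h =>
      by_cases hab : a = b
      · simp only [pvDelFirst?, if_pos hab] at h
        cases h
        subst hab
        simp [List.foldl_cons, pvStep_step_self hs]
      · simp only [pvDelFirst?, if_neg hab, Option.map_eq_some_iff] at h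
        obtain ⟨u, hu, rfl⟩ := h
        simp only [List.foldl_cons]
        exact ih (pvStep_reduced hs a) hu

theorem pvFoldl_reduceFix (w : List Char) : ∀ {s : List Char}, pvReduced s →
    (pvReduceFix w).foldl pvStep s = w.foldl pvStep s := by
  induction w using pvReduceFix.induct with
  | case1 w w' h ih =>
    intro s hs
    rw [pvReduceFix, h]
    rw [ih hs, pvFoldl_del hs h]
  | case2 w h =>
    intro s _
    rw [pvReduceFix, h]

-- a fixpoint of pvDelFirst? has no adjacent equal pair
theorem pvDelFirst?_none_reduced : ∀ {w : List Char}, pvDelFirst? w = none → pvReduced w := by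
  intro w
  induction w with
  | nil => intro _; simp [pvReduced]
  | cons a t ih =>
    intro h
    match t with
    | [] => simp [pvReduced]
    | b :: t =>
      by_cases hab : a = b
      · simp [pvDelFirst?, hab] at h
      · simp only [pvDelFirst?, if_neg hab, Option.map_eq_none_iff] at h
        exact List.isChain_cons_cons.mpr ⟨hab, ih h⟩

theorem pvReduceFix_fix (w : List Char) : pvDelFirst? (pvReduceFix w) = none := by
  induction w using pvReduceFix.induct with
  | case1 w w' h ih => rw [pvReduceFix, h]; exact ih
  | case2 w h => rw [pvReduceFix, h]; exact h

-- on a list with no adjacent equal pair the stack run only pushes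
theorem pvFoldl_of_reduced : ∀ {r s : List Char}, pvReduced r →
    (∀ a b, r.head? = some a → s.head? = some b → a ≠ b) →
    r.foldl pvStep s = r.reverse ++ s := by
  intro r
  induction r with
  | nil => intro s _ _; simp
  | cons a t ih =>
    intro s hr hhead
    have hpush : pvStep s a = a :: s := by
      match s with
      | [] => simp [pvStep]
      | c :: s' =>
        have hca : c ≠ a := Ne.symm (hhead a c rfl rfl)
        simp [pvStep, hca]
    simp only [List.foldl_cons, hpush, List.reverse_cons, List.append_assoc, List.singleton_append]
    exact ih hr.tail (by
      intro x y hx hy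
      simp at hy
      match t, hx with
      | b :: t', hx =>
        simp at hx
        subst hx
        exact fun hxy => (List.isChain_cons_cons.mp hr).1 (hy ▸ hxy ▸ rfl))

theorem pvStep_length (s : List Char) (ch : Char) :
    (pvStep s ch).length % 2 = (s.length + 1) % 2 := by
  match s with
  | [] => simp [pvStep]
  | top :: rest => by_cases h : top = ch <;> simp [pvStep, h] <;> omega

theorem pvFoldl_length : ∀ (w s : List Char), (w.foldl pvStep s).length % 2 = (s.length + w.length) % 2 := by
  intro w
  induction w with
  | nil => simp
  | cons a t ih =>
    intro s
    simp only [List.foldl_cons, List.length_cons]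
    rw [ih (pvStep s a)]
    have := pvStep_length s a
    omega

-- main per-word fact: fixpoint-empty ↔ stack-empty
theorem pvKey (w : List Char) : pvReduceFix w = [] ↔ w.foldl pvStep [] = [] := by
  constructor
  · intro h
    have := pvFoldl_reduceFix w (s := []) (by simp [pvReduced])
    rw [h] at this
    simpa using this.symm
  · intro h
    have hred : pvReduced (pvReduceFix w) := pvDelFirst?_none_reduced (pvReduceFix_fix w)
    have := pvFoldl_reduceFix w (s := []) (by simp [pvReduced])
    rw [h] at this
    rw [pvFoldl_of_reduced hred (by simp)] at this
    simpa using this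

theorem pvEmpty_even (w : List Char) (h : w.foldl pvStep [] = []) : w.length % 2 = 0 := by
  have := pvFoldl_length w []
  rw [h] at this
  simpa using this.symm

theorem pvBody_eq (ans : Int) (word : String) :
    (if PySem.Int.mod (PySem.Str.len word) 2 = 1 then ans
     else
       let stack := word.toList.foldl pvStep []
       if stack = [] then ans + 1 else ans)
    = (if pvReduceFix word.toList = [] then ans + 1 else ans) := by
  have hlen : PySem.Int.mod (PySem.Str.len word) 2 = ((word.toList.length % 2 : Nat) : Int) := by
    rw [PySem.Str.len_eq]
    exact_mod_cast PySem.Int.mod_natCast word.toList.length 2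
  by_cases hodd : word.toList.length % 2 = 1
  · have h1 : PySem.Int.mod (PySem.Str.len word) 2 = 1 := by rw [hlen, hodd]; rfl
    have hne : word.toList.foldl pvStep [] ≠ [] := fun h => by
      have := pvEmpty_even word.toList h; omega
    have hr : pvReduceFix word.toList ≠ [] := fun h => hne ((pvKey word.toList).mp h)
    rw [if_pos h1, if_neg hr]
  · have h1 : ¬ PySem.Int.mod (PySem.Str.len word) 2 = 1 := by
      rw [hlen]; intro hh; exact hodd (by exact_mod_cast hh)
    rw [if_neg h1]
    show (if word.toList.foldl pvStep [] = [] then ans + 1 else ans)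
        = (if pvReduceFix word.toList = [] then ans + 1 else ans)
    have hk := pvKey word.toList
    by_cases h : word.toList.foldl pvStep [] = []
    · rw [if_pos h, if_pos (hk.mpr h)]
    · rw [if_neg h, if_neg (fun hh => h (hk.mp hh))]

-- ===== VERDICT (by name: the statement is the Claim_ definition above) =====
theorem solution_spec : Claim_equal_solution := by
  intro n words _
  unfold Spec_solution solution solution_alt
  congr 1
  funext ans word
  exact pvBody_eq ans word
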